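-- pv_equiv track=rewrite | github.com/cesarsanchez1/My-Leetcode-Solutions | 1844-replace-all-digits-with-characters/1844-replace-all-digits-with-characters.py | replaceDigits
-- ===== SOURCE A (Python) =====
-- def replaceDigits(s: str) -> str:
--
--     res = []
--     def shift(letter: str, x: int):
--         a = chr(ord(letter)+x)
--         return a
--
--     res.append(s[0])
--
--     for i in range(1, len(s)):
--         if i%2!=0:
--             res.append(shift(s[i-1], int(s[i])))
--         else:
--             res.append(s[i])
--
--     return ''.join(res)
-- ===== SOURCE B (Python) =====
-- def replaceDigits(s: str) -> str:
--     letters = s[::2]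
--     digits = s[1::2]
--     out = []
--     for l, d in zip(letters, digits):
--         out.append(l)
--         out.append(chr(ord(l) + int(d)))
--     if len(letters) > len(digits):
--         out.append(letters[-1])
--     return ''.join(out)
-- ===== Notes on version B (the rewrite author's own statement) =====
-- stated objective: alternative
-- what changed: B splits the string into the even-index letters and odd-index digits with strided slices, zips them and emits each letter with its shifted companion (plus the unpaired final letter), instead of A's single index loop branching on index parity.
-- crash fix: On the empty string A raises IndexError (it evaluates s[0] before the loop) while B returns ''. — e.g. on replaceDigits(""): A raises IndexError, B returns ""
import Mathlib
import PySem

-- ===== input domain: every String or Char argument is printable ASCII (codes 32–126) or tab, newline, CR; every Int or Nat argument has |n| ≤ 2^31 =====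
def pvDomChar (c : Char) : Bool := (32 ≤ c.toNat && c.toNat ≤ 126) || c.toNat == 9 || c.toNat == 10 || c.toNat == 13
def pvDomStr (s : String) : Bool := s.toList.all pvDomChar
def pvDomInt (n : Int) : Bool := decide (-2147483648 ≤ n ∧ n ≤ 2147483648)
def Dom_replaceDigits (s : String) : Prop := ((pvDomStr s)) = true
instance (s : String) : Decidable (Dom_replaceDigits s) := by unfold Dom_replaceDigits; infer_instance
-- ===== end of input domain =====

-- B re-implements A with strided slices + zip instead of an index loop branching on parity; same value wherever A returns, and B returns '' where A raises on ''.

-- chr(ord(letter)+x): exact whenever the resulting code is a valid scalar value (always the case under Pre_: ASCII char + digit shift)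
def pyShift (letter : Char) (x : Int) : Char := Char.ofNat ((letter.toNat : Int) + x).toNat

-- ===== PORT A =====
def replaceDigits (s : String) : String :=
  let cs := s.toList
  -- res = [s[0]]  (s[0] raises IndexError on the empty string: excluded by Pre_)
  let res : List Char := [(PySem.List.pyGet? cs 0).getD ' ']
  -- for i in range(1, len(s)): if i%2!=0: res.append(shift(s[i-1], int(s[i]))) else: res.append(s[i])
  let res := (PySem.List.pyRange 1 cs.length 1).foldl (fun res i =>
    if PySem.Int.mod i 2 ≠ 0 then
      res ++ [pyShift ((PySem.List.pyGet? cs (i - 1)).getD ' ')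
                ((PySem.Int.ofChars? [(PySem.List.pyGet? cs i).getD ' ']).getD 0)]
    else
      res ++ [(PySem.List.pyGet? cs i).getD ' ']) res
  String.ofList res

-- ===== PORT B =====
def replaceDigits_alt (s : String) : String :=
  let cs := s.toList
  let letters := (PySem.List.slice? cs none none 2).getD []      -- letters = s[::2]
  let digits := (PySem.List.slice? cs (some 1) none 2).getD []   -- digits = s[1::2]
  -- for l, d in zip(letters, digits): out.append(l); out.append(chr(ord(l)+int(d)))
  let out := (letters.zip digits).foldl (fun out ld =>
    out ++ [ld.1] ++ [pyShift ld.1 ((PySem.Int.ofChars? [ld.2]).getD 0)]) []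
  -- if len(letters) > len(digits): out.append(letters[-1])
  let out := if letters.length > digits.length
    then out ++ [(PySem.List.pyGet? letters (-1)).getD ' ']
    else out
  String.ofList out

-- ===== PRECONDITION & SPEC =====
-- Pre_ is exactly A's return domain: A raises IndexError on '' and ValueError when a char at an odd index is not a decimal digit.
def Pre_replaceDigits (s : String) : Prop :=
  s.toList ≠ [] ∧ ∀ i, i < s.toList.length → i % 2 = 1 → (s.toList.getD i ' ').isDigit = true
instance (s : String) : Decidable (Pre_replaceDigits s) := by unfold Pre_replaceDigits; infer_instance
def pvWitness_replaceDigits : String := "a1b2c"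

-- On the empty string A raises IndexError (it evaluates s[0] before the loop) while B returns ''.
def Raises_replaceDigits (s : String) : Prop := s.toList = []
instance (s : String) : Decidable (Raises_replaceDigits s) := by unfold Raises_replaceDigits; infer_instance
def pvRaiseWitness_replaceDigits : String := ""
def pvRaiseWitnessOut_replaceDigits : String := ""

def Spec_replaceDigits (s : String) (out : String) : Prop := out = replaceDigits_alt s
instance (s : String) (out : String) : Decidable (Spec_replaceDigits s out) := by unfold Spec_replaceDigits; infer_instance

-- ===== CLAIM (what is proved, stated in full; the proofs are below) =====
def Claim_equal_replaceDigits : Prop := ∀ (s : String), Dom_replaceDigits s → Pre_replaceDigits s → Spec_replaceDigits s (replaceDigits s)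
def Claim_raises_replaceDigits : Prop := (∀ (s : String), Dom_replaceDigits s → Raises_replaceDigits s → ¬ Pre_replaceDigits s) ∧ (Dom_replaceDigits (pvRaiseWitness_replaceDigits) ∧ Raises_replaceDigits (pvRaiseWitness_replaceDigits) ∧ replaceDigits_alt (pvRaiseWitness_replaceDigits) = pvRaiseWitnessOut_replaceDigits)

-- ===== LEMMAS AND PROOFS =====

-- the shape both ports compute: letter, shifted letter, letter, shifted letter, …, trailing unpaired letter
def pairF : List Char → List Char
  | [] => []
  | [a] => [a]
  | a :: b :: t => a :: pyShift a ((PySem.Int.ofChars? [b]).getD 0) :: pairF t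

-- the elements at even indices
def evens : List Char → List Char
  | [] => []
  | [a] => [a]
  | a :: _ :: t => a :: evens t

theorem evens_cons (x : Char) (t : List Char) : evens (x :: t) = x :: evens t.tail := by
  cases t <;> simp [evens]

theorem toNat_div_two (m : Nat) : ((m : Int) / 2).toNat = m / 2 := by
  rw [show (2:Int) = ((2:Nat):Int) from rfl, ← Int.natCast_div, Int.toNat_natCast]

theorem filterMap_range_two (cs : List Char) :
    (List.range ((cs.length + 1) / 2)).filterMap (fun k => cs[2 * k]?) = evens cs := by
  fun_induction evens cs with
  | case1 => simp
  | case2 a => simp [List.range_succ]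
  | case3 a b t ih =>
    have hk : ∀ k, (a :: b :: t)[2 * Nat.succ k]? = t[2 * k]? := by
      intro k
      have h3 : 2 * Nat.succ k = 2 * k + 1 + 1 := by omega
      simp [h3]
    have h4 : ((a :: b :: t).length + 1) / 2 = (t.length + 1) / 2 + 1 := by simp; omega
    rw [h4, List.range_succ_eq_map, List.filterMap_cons, List.filterMap_map]
    simp only [Function.comp_def, hk]
    simp [ih]

-- s[::2] keeps exactly the even-index elements
theorem slice?_even (cs : List Char) :
    PySem.List.slice? cs none none 2 = some (evens cs) := by
  rw [← filterMap_range_two]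
  simp only [PySem.List.slice?, PySem.List.sliceIndices]
  norm_num
  have hc : (if 0 < cs.length then (((cs.length : Int) + 2 - 1) / 2).toNat else 0)
      = (cs.length + 1) / 2 := by
    split
    · have h1 : ((cs.length : Int) + 2 - 1) = ((cs.length + 1 : Nat) : Int) := by push_cast; ring
      rw [h1, toNat_div_two]
    · omega
  rw [hc]
  apply List.filterMap_congr
  intro x _
  have h2 : (2 * (x : Int)).toNat = 2 * x := by omega
  rw [h2]

-- s[1::2] keeps exactly the odd-index elements
theorem slice?_odd (cs : List Char) :
    PySem.List.slice? cs (some 1) none 2 = some (evens cs.tail) := by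
  rw [← filterMap_range_two]
  simp only [PySem.List.slice?, PySem.List.sliceIndices]
  norm_num
  match cs with
  | [] => simp
  | a :: t =>
    simp only [List.length_cons]
    have h0 : (min (1:Int) (↑(t.length + 1))) = 1 := by push_cast; omega
    rw [h0]
    have hc : (if 1 < t.length + 1 then (((↑(t.length + 1) : Int) - 1 + 2 - 1) / 2).toNat else 0)
        = (t.length + 1 - 1 + 1) / 2 := by
      split
      · have h1 : ((↑(t.length + 1) : Int) - 1 + 2 - 1) = ((t.length + 1 : Nat) : Int) := by
          push_cast; ring
        rw [h1, toNat_div_two]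
        omega
      · omega
    rw [hc]
    apply List.filterMap_congr
    intro x _
    have h2 : ((1:Int) + 2 * (x : Int)).toNat = 2 * x + 1 := by omega
    rw [h2]

-- ---- A side ----

def aBody (cs : List Char) (i : Int) : Char :=
  if PySem.Int.mod i 2 ≠ 0 then
    pyShift ((PySem.List.pyGet? cs (i - 1)).getD ' ')
      ((PySem.Int.ofChars? [(PySem.List.pyGet? cs i).getD ' ']).getD 0)
  else (PySem.List.pyGet? cs i).getD ' '

theorem aBody_shift (a b : Char) (t : List Char) (i : Int) (h1 : 1 ≤ i) :
    aBody (a :: b :: t) (i + 2) = aBody t i := by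
  have hm : PySem.Int.mod (i + 2) 2 = PySem.Int.mod i 2 := by
    rw [PySem.Int.mod_eq_emod_of_pos (by omega), PySem.Int.mod_eq_emod_of_pos (by omega)]
    omega
  have hg : ∀ j : Int, 0 ≤ j → PySem.List.pyGet? (a :: b :: t) (j + 2) = PySem.List.pyGet? t j := by
    intro j hj
    rw [PySem.List.pyGet?_of_nonneg _ (show (0:Int) ≤ j + 2 by omega),
      PySem.List.pyGet?_of_nonneg _ hj]
    have h2 : (j + 2).toNat = j.toNat + 1 + 1 := by omega
    rw [h2]
    simp
  have hg1 : PySem.List.pyGet? (a :: b :: t) (i + 2 - 1) = PySem.List.pyGet? t (i - 1) := by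
    have h3 : i + 2 - 1 = (i - 1) + 2 := by ring
    rw [h3, hg (i - 1) (by omega)]
  unfold aBody
  rw [hm, hg1, hg i (by omega)]

theorem A_eq_pairF (cs : List Char) (h : cs ≠ []) :
    (PySem.List.pyRange 1 cs.length 1).foldl
      (fun res i => res ++ [aBody cs i]) [(PySem.List.pyGet? cs 0).getD ' '] = pairF cs := by
  rw [PySem.List.foldl_append_singleton_eq_map]
  fun_induction pairF cs with
  | case1 => exact absurd rfl h
  | case2 a =>
    rw [show ((([a]:List Char).length : Int) = 1) by simp, PySem.List.pyRange_one_eq_nil (by omega)]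
    simp [PySem.List.pyGet?, PySem.List.pyIdx?]
  | case3 a b t ih =>
    have hn : (((a :: b :: t).length : Int)) = (t.length : Int) + 2 := by simp; ring
    rw [hn]
    have h1 : PySem.List.pyGet? (a :: b :: t) 0 = some a := PySem.List.pyGet?_zero_cons a _
    match t with
    | [] =>
      rw [show ((([]:List Char).length : Int) + 2 = 2) by simp]
      rw [PySem.List.pyRange_one_cons (by omega), PySem.List.pyRange_one_eq_nil (by omega)]
      simp only [List.map_cons, List.map_nil, h1]
      simp [aBody, pairF, PySem.Int.mod, PySem.List.pyGet?, PySem.List.pyIdx?]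
    | c :: t' =>
      have h2 : (1:Int) ≤ 3 := by omega
      have h3 : (3:Int) ≤ (((c :: t').length : Int) + 2) := by simp; omega
      rw [PySem.List.pyRange_one_append 1 3 _ h2 h3]
      have h13 : PySem.List.pyRange 1 3 1 = [1, 2] := by decide
      rw [h13, List.map_append]
      -- tail of the range: shift indices down by two into t
      have hshift : (PySem.List.pyRange 3 (((c :: t').length : Int) + 2) 1).map (aBody (a :: b :: c :: t'))
          = (PySem.List.pyRange 1 ((c :: t').length : Int) 1).map (aBody (c :: t')) := by
        rw [PySem.List.pyRange_one 3, PySem.List.pyRange_one 1, List.map_map, List.map_map]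
        have hl : ((((c :: t').length : Int) + 2) - 3).toNat = (((c :: t').length : Int) - 1).toNat := by
          omega
        rw [hl]
        apply List.map_congr_left
        intro k _
        simp only [Function.comp_apply]
        have h4 : (3 : Int) + k = (1 + k) + 2 := by ring
        rw [h4, aBody_shift _ _ _ _ (by omega)]
      rw [hshift]
      -- head two elements
      have g0 : PySem.List.pyGet? (a :: b :: c :: t') (1 - 1) = some a := by
        norm_num [PySem.List.pyGet?_zero_cons]
      have g1 : PySem.List.pyGet? (a :: b :: c :: t') 1 = some b := by
        rw [PySem.List.pyGet?_of_nonneg _ (by omega)]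
        simp [show ((1:Int).toNat) = 1 from rfl]
      have g2 : PySem.List.pyGet? (a :: b :: c :: t') 2 = some c := by
        rw [PySem.List.pyGet?_of_nonneg _ (by omega)]
        simp [show ((2:Int).toNat) = 2 from rfl]
      have hb1 : aBody (a :: b :: c :: t') 1
          = pyShift a ((PySem.Int.ofChars? [b]).getD 0) := by
        simp only [aBody]
        rw [if_pos (by decide), g0, g1]
        rfl
      have hb2 : aBody (a :: b :: c :: t') 2 = c := by
        simp only [aBody]
        rw [if_neg (by decide), g2]
        rfl
      have hc0 : PySem.List.pyGet? (c :: t') 0 = some c := PySem.List.pyGet?_zero_cons c _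
      simp only [List.map_cons, List.map_nil]
      rw [hb1, hb2]
      simp only [h1, Option.getD_some]
      rw [← ih (by simp)]
      simp

-- ---- B side ----

theorem B_eq_pairF (cs : List Char) :
    (if (evens cs).length > (evens cs.tail).length
      then ((evens cs).zip (evens cs.tail)).flatMap
            (fun ld => [ld.1, pyShift ld.1 ((PySem.Int.ofChars? [ld.2]).getD 0)])
          ++ [(PySem.List.pyGet? (evens cs) (-1)).getD ' ']
      else ((evens cs).zip (evens cs.tail)).flatMap
            (fun ld => [ld.1, pyShift ld.1 ((PySem.Int.ofChars? [ld.2]).getD 0)]))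
      = pairF cs := by
  fun_induction pairF cs with
  | case1 => simp [evens]
  | case2 a => simp [evens, PySem.List.pyGet?_neg_one]
  | case3 a b t ih =>
    have hL : evens (a :: b :: t) = a :: evens t := by rw [evens_cons]; simp
    have hD : evens (b :: t) = b :: evens t.tail := evens_cons b t
    simp only [List.tail_cons, hL, hD, List.zip_cons_cons, List.flatMap_cons,
      List.length_cons, gt_iff_lt, Nat.add_lt_add_iff_right] at *
    by_cases hgt : (evens t.tail).length < (evens t).length
    · simp only [if_pos hgt] at *
      have hne : evens t ≠ [] := by
        intro he; rw [he] at hgt; simp at hgt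
      obtain ⟨e, es, he⟩ := List.exists_cons_of_ne_nil hne
      rw [PySem.List.pyGet?_neg_one] at *
      have hlast : (a :: evens t).getLast? = (evens t).getLast? := by
        rw [he]; exact List.getLast?_cons_cons
      rw [hlast, ← ih]
      simp
    · simp only [if_neg hgt] at *
      rw [← ih]
      simp

-- zip loop of port B as a flatMap
theorem B_fold_eq_flatMap (L D : List Char) (init : List Char) :
    (L.zip D).foldl (fun out ld =>
      out ++ [ld.1] ++ [pyShift ld.1 ((PySem.Int.ofChars? [ld.2]).getD 0)]) init
    = init ++ (L.zip D).flatMap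
        (fun ld => [ld.1, pyShift ld.1 ((PySem.Int.ofChars? [ld.2]).getD 0)]) := by
  have hb : (fun (out : List Char) (ld : Char × Char) =>
      out ++ [ld.1] ++ [pyShift ld.1 ((PySem.Int.ofChars? [ld.2]).getD 0)])
      = (fun out ld => out ++ [ld.1, pyShift ld.1 ((PySem.Int.ofChars? [ld.2]).getD 0)]) := by
    funext out ld; simp
  rw [hb, PySem.List.foldl_append_eq_flatMap]

-- ===== VERDICT (by name: the statement is the Claim_ definition above) =====
theorem replaceDigits_spec : Claim_equal_replaceDigits := by
  intro s _ hpre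
  unfold Spec_replaceDigits replaceDigits replaceDigits_alt
  simp only [slice?_even, slice?_odd, Option.getD_some]
  rw [B_fold_eq_flatMap, List.nil_append]
  have hbody : (fun (res : List Char) (i : Int) =>
      if PySem.Int.mod i 2 ≠ 0 then
        res ++ [pyShift ((PySem.List.pyGet? s.toList (i - 1)).getD ' ')
                  ((PySem.Int.ofChars? [(PySem.List.pyGet? s.toList i).getD ' ']).getD 0)]
      else
        res ++ [(PySem.List.pyGet? s.toList i).getD ' '])
      = fun res i => res ++ [aBody s.toList i] := by
    funext res i
    simp only [aBody]
    split <;> rfl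
  rw [hbody, A_eq_pairF s.toList hpre.1, B_eq_pairF]

theorem replaceDigits_raises : Claim_raises_replaceDigits := by
  unfold Claim_raises_replaceDigits
  refine ⟨?_, by decide⟩
  intro s _ hr hp
  exact hp.1 hr

-- self-check: the raises witness lies in Raises_ and port B returns the stated literal there
theorem replaceDigits_raises_ok : Raises_replaceDigits pvRaiseWitness_replaceDigits ∧ replaceDigits_alt pvRaiseWitness_replaceDigits = pvRaiseWitnessOut_replaceDigits :=
  ⟨replaceDigits_raises.2.2.1, replaceDigits_raises.2.2.2⟩
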